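-- pv_equiv track=rewrite | github.com/verilog-to-routing/vtr-verilog-to-routing | ODIN_II/regression_test/tools/asr_vector_maker.py | make_output_vector
-- ===== SOURCE A (Python) =====
-- def make_output_vector(bits, length, inputs):
--     output = 0
--     outputs = []
--     height = len(inputs[0])
--     shift_flag = 1
--     for i in range(0, height):
--         if i%2 == shift_flag:
--             if inputs[2][i] != 1:
--                 output = shift(bits, length, inputs[0][i])
--             else:
--                 output = 0
--         outputs.append(output)
--     return outputs
--
-- def shift(bits, length, value):
--     new_value = value >> length
--     msb_mask = (1 << (bits - 1))
--     if (value & msb_mask) != 0 and length > 0: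
--         padding = msb_mask
--         for i in range(0, length-1):
--             padding = padding >> 1
--             padding = padding | msb_mask
--         new_value = new_value | padding
--     return new_value
-- ===== SOURCE B (Python) =====
-- def _asr(bits, length, value):
--     new_value = value >> length
--     if length > 0 and (value & (1 << (bits - 1))) != 0:
--         new_value |= ((1 << min(length, bits)) - 1) << max(bits - length, 0)
--     return new_value
--
-- def make_output_vector(bits, length, inputs):
--     height = len(inputs[0])
--     curs = [0 if inputs[2][2 * k + 1] == 1 else _asr(bits, length, inputs[0][2 * k + 1])
--             for k in range(height // 2)]
--     doubled = [0]
--     for c in curs: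
--         doubled.append(c)
--         doubled.append(c)
--     return doubled[:height]
-- ===== Notes on version B (the rewrite author's own statement) =====
-- stated objective: alternative
-- what changed: B replaces A's per-element padding loop in shift() with the closed-form sign-extension mask ((1 << min(length, bits)) - 1) << max(bits - length, 0), and replaces A's stateful even/odd carrying loop by three staged passes: compute one value per odd index, duplicate each into a [0]-prefixed list, and truncate to height; this trades A's single stateful loop for closed-form masking plus staged list construction.
import Mathlib
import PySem

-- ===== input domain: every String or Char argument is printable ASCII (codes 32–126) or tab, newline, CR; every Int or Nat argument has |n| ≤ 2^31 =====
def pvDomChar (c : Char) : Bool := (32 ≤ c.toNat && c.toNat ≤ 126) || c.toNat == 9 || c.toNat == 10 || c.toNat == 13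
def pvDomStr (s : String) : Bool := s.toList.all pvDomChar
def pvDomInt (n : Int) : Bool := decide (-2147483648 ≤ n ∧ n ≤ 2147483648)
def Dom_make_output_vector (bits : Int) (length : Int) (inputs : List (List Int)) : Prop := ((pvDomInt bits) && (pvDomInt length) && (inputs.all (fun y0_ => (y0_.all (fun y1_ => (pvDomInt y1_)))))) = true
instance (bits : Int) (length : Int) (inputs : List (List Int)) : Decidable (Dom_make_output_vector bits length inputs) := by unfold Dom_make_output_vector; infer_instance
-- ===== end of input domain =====

-- B replaces A's per-call padding loop with the closed-form mask
-- ((1 << min(length, bits)) - 1) << (bits - length) and replaces the stateful even/odd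
-- loop by staged passes: one value per odd index, duplicated into a [0]-prefixed list,
-- truncated to height (an alternative decomposition; no speed claim).

-- ===== PORT A =====
-- shift(bits, length, value): 'value >> length' / '1 << (bits-1)' raise for
-- length < 0 / bits < 1 in Python; Pre_ excludes those inputs, .toNat is a dummy there.
def pvShiftA (bits : Int) (length : Int) (value : Int) : Int :=
  let new_value := value >>> length.toNat
  let msb_mask : Int := 1 <<< (bits - 1).toNat
  if PySem.Int.band value msb_mask ≠ 0 ∧ length > 0 then
    let padding := (PySem.List.pyRange 0 (length - 1) 1).foldl
      (fun p _ => PySem.Int.bor (p >>> (1 : Nat)) msb_mask) msb_mask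
    PySem.Int.bor new_value padding
  else new_value

def make_output_vector (bits : Int) (length : Int) (inputs : List (List Int)) : List Int :=
  let height : Int := ((PySem.List.pyGetD inputs 0 []).length : Int)
  let st := (PySem.List.pyRange 0 height 1).foldl
    (fun (st : Int × List Int) i =>
      let output : Int :=
        if PySem.Int.mod i 2 = 1 then
          (if PySem.List.pyGetD (PySem.List.pyGetD inputs 2 []) i 0 ≠ 1 then
            pvShiftA bits length (PySem.List.pyGetD (PySem.List.pyGetD inputs 0 []) i 0)
          else 0)
        else st.1
      (output, st.2 ++ [output])) ((0 : Int), ([] : List Int))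
  st.2

-- ===== PORT B =====
def pvAsrB (bits : Int) (length : Int) (value : Int) : Int :=
  let new_value := value >>> length.toNat
  if length > 0 ∧ PySem.Int.band value (1 <<< (bits - 1).toNat) ≠ 0 then
    PySem.Int.bor new_value (((1 <<< (min length bits).toNat) - 1) <<< (bits - length).toNat)
  else new_value

-- 'doubled[:height]' with height = len(inputs[0]) ≥ 0 is exactly List.take height.toNat
def make_output_vector_alt (bits : Int) (length : Int) (inputs : List (List Int)) : List Int :=
  let height : Int := ((PySem.List.pyGetD inputs 0 []).length : Int)
  let curs : List Int := (PySem.List.pyRange 0 (PySem.Int.floordiv height 2) 1).map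
    (fun k =>
      if PySem.List.pyGetD (PySem.List.pyGetD inputs 2 []) (2 * k + 1) 0 = 1 then 0
      else pvAsrB bits length (PySem.List.pyGetD (PySem.List.pyGetD inputs 0 []) (2 * k + 1) 0))
  let doubled : List Int := 0 :: curs.flatMap (fun c => [c, c])
  doubled.take height.toNat

-- ===== PRECONDITION & SPEC =====
-- Exactly the inputs on which Python A returns: inputs nonempty (inputs[0] is read);
-- when an odd row index exists (len(inputs[0]) ≥ 2), inputs[2][i] is read at every odd
-- i < len(inputs[0]); and when some such entry differs from 1, shift() is called, which
-- raises unless bits ≥ 1 and length ≥ 0.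
def Pre_make_output_vector (bits : Int) (length : Int) (inputs : List (List Int)) : Prop :=
  inputs ≠ [] ∧
  (2 ≤ (inputs.getD 0 []).length →
    3 ≤ inputs.length ∧
    2 * ((inputs.getD 0 []).length / 2) ≤ (inputs.getD 2 []).length ∧
    (((List.range ((inputs.getD 0 []).length / 2)).any
        (fun k => (inputs.getD 2 []).getD (2 * k + 1) 0 != 1)) = true →
      1 ≤ bits ∧ 0 ≤ length))
instance (bits : Int) (length : Int) (inputs : List (List Int)) : Decidable (Pre_make_output_vector bits length inputs) := by unfold Pre_make_output_vector; infer_instance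

def pvWitness_make_output_vector : Int × Int × List (List Int) := (4, 1, [[5, -6, 3], [], [0, 0, 0]])

def Spec_make_output_vector (bits : Int) (length : Int) (inputs : List (List Int)) (out : List Int) : Prop := out = make_output_vector_alt bits length inputs
instance (bits : Int) (length : Int) (inputs : List (List Int)) (out : List Int) : Decidable (Spec_make_output_vector bits length inputs out) := by unfold Spec_make_output_vector; infer_instance

-- ===== CLAIM (what is proved, stated in full; the proofs are below) =====
def Claim_equal_make_output_vector : Prop := ∀ (bits : Int) (length : Int) (inputs : List (List Int)), Dom_make_output_vector bits length inputs → Pre_make_output_vector bits length inputs → Spec_make_output_vector bits length inputs (make_output_vector bits length inputs)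

-- ===== LEMMAS AND PROOFS =====

lemma pv_bor_natCast (x y : Nat) : PySem.Int.bor (x : Int) (y : Int) = ((x ||| y : Nat) : Int) := by
  simp [PySem.Int.bor]
lemma pv_lor_two_pow (x n : Nat) (h : x < 2 ^ n) : x ||| 2 ^ n = x + 2 ^ n := by
  rw [Nat.lor_comm]
  have h2 := Nat.two_pow_add_eq_or_of_lt h 1
  simp only [mul_one] at h2
  omega
lemma pv_foldl_const {α β : Type} (l : List α) (f : β → β) (init : β) :
    l.foldl (fun p _ => f p) init = f^[l.length] init := by
  induction l generalizing init with
  | nil => rfl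
  | cons a l ih => simp [List.foldl_cons, ih, Function.iterate_succ_apply]
lemma pv_padding_iter (b : Nat) (hb : 1 ≤ b) (n : Nat) :
    (fun p : Int => PySem.Int.bor (p >>> (1 : Nat)) ((2 ^ (b - 1) : Nat) : Int))^[n]
      ((2 ^ (b - 1) : Nat) : Int) = ((2 ^ b - 2 ^ (b - (n + 1)) : Nat) : Int) := by
  induction n with
  | zero =>
    simp only [Function.iterate_zero, id_eq]
    congr 1
    have e : b - (0 + 1) = b - 1 := by omega
    rw [e]
    have h2 : 2 ^ b = 2 * 2 ^ (b - 1) := by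
      conv_lhs => rw [show b = (b - 1) + 1 by omega]
      ring
    omega
  | succ n ih =>
    rw [Function.iterate_succ_apply', ih]
    rw [← Int.natCast_shiftRight, pv_bor_natCast]
    congr 1
    rw [Nat.shiftRight_eq_div_pow]
    have h2 : 2 ^ b = 2 * 2 ^ (b - 1) := by
      conv_lhs => rw [show b = (b - 1) + 1 by omega]
      ring
    by_cases hcase : b ≤ n + 1
    · have hbn : b - (n + 1) = 0 := by omega
      have hbn2 : b - (n + 1 + 1) = 0 := by omega
      have hdiv : (2 ^ b - 2 ^ (b - (n + 1))) / 2 ^ 1 = 2 ^ (b - 1) - 1 := by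
        rw [hbn]; simp; omega
      rw [hdiv, pv_lor_two_pow _ _ (by have := Nat.one_le_two_pow (n := b - 1); omega)]
      rw [hbn2]; omega
    · have h3 : 2 ^ (b - (n + 1)) = 2 * 2 ^ (b - (n + 1 + 1)) := by
        conv_lhs => rw [show b - (n + 1) = (b - (n + 1 + 1)) + 1 by omega]
        ring
      have hdiv : (2 ^ b - 2 ^ (b - (n + 1))) / 2 ^ 1 = 2 ^ (b - 1) - 2 ^ (b - (n + 1 + 1)) := by
        simp; omega
      rw [hdiv]
      have hone : 1 ≤ 2 ^ (b - (n + 1 + 1)) := Nat.one_le_two_pow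
      have hone2 : 1 ≤ 2 ^ (b - 1) := Nat.one_le_two_pow
      have hlt : 2 ^ (b - 1) - 2 ^ (b - (n + 1 + 1)) < 2 ^ (b - 1) := by omega
      rw [pv_lor_two_pow _ _ hlt]
      have hle : 2 ^ (b - (n + 1 + 1)) ≤ 2 ^ (b - 1) :=
        Nat.pow_le_pow_right (by omega) (by omega)
      omega
lemma pv_padding_closed (bits length : Int) (hb : 1 ≤ bits) (hl : length > 0) :
    (PySem.List.pyRange 0 (length - 1) 1).foldl
      (fun p _ => PySem.Int.bor (p >>> (1:Nat)) (((1 <<< (bits - 1).toNat : Nat)) : Int))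
      (((1 <<< (bits - 1).toNat : Nat)) : Int)
    = (((1 <<< (min length bits).toNat - 1) <<< (bits - length).toNat : Nat) : Int) := by
  have e1 : (1 <<< (bits - 1).toNat : Nat) = 2 ^ (bits.toNat - 1) := by
    rw [Nat.shiftLeft_eq, one_mul]
    congr 1
    omega
  rw [e1, pv_foldl_const, PySem.List.length_pyRange_one, pv_padding_iter _ (by omega)]
  congr 1
  rw [Nat.shiftLeft_eq, Nat.shiftLeft_eq, one_mul]
  have e3 : (length - 1 - 0).toNat + 1 = length.toNat := by omega
  have e4 : (min length bits).toNat = min length.toNat bits.toNat := by omega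
  have e5 : (bits - length).toNat = bits.toNat - length.toNat := by omega
  rw [e3, e4, e5]
  set b := bits.toNat with hbd
  set L := length.toNat with hLd
  have hb1 : 1 ≤ b := by omega
  have hL1 : 1 ≤ L := by omega
  by_cases hLb : L ≤ b
  · rw [min_eq_left hLb]
    have e6 : L + (b - L) = b := by omega
    have h7 : 2 ^ (b - L) ≤ 2 ^ b := Nat.pow_le_pow_right (by omega) (by omega)
    have h8 : (1:Nat) ≤ 2 ^ (b - L) := Nat.one_le_two_pow
    have h9 : (1:Nat) ≤ 2 ^ L := Nat.one_le_two_pow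
    have h10 : 2 ^ L * 2 ^ (b - L) = 2 ^ b := by rw [← pow_add, e6]
    have h11 : (2 ^ L - 1) * 2 ^ (b - L) = 2 ^ L * 2 ^ (b - L) - 2 ^ (b - L) := by
      rw [Nat.sub_mul, one_mul]
    omega
  · rw [min_eq_right (by omega : b ≤ L)]
    have e6 : b - L = 0 := by omega
    rw [e6]
    simp

-- A's shift() equals B's closed-form _asr()
lemma pv_shift_eq (bits length value : Int) (hb : 1 ≤ bits) :
    pvShiftA bits length value = pvAsrB bits length value := by
  unfold pvShiftA pvAsrB
  simp only []
  split_ifs with h1 h2 h3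
  · congr 1
    exact pv_padding_closed bits length hb h1.2
  · exact absurd ⟨h1.2, h1.1⟩ h2
  · exact absurd ⟨h3.2, h3.1⟩ h1
  · rfl

-- A's index loop over an even range 2m equals the pairwise fold over m
lemma pv_pair_fold (c : Int → Int) (m : Nat) (st : Int × List Int) :
    (PySem.List.pyRange 0 (2 * (m : Int)) 1).foldl
      (fun (st : Int × List Int) i =>
        let o : Int := if PySem.Int.mod i 2 = 1 then c i else st.1
        (o, st.2 ++ [o])) st
    = (PySem.List.pyRange 0 (m : Int) 1).foldl
      (fun (st : Int × List Int) k =>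
        let cur : Int := c (2 * k + 1)
        (cur, st.2 ++ [st.1, cur])) st := by
  induction m generalizing st with
  | zero => simp [PySem.List.pyRange_one_eq_nil]
  | succ m ih =>
    have e1 : PySem.List.pyRange 0 (2 * ((m : Int) + 1)) 1
        = PySem.List.pyRange 0 (2 * (m : Int)) 1 ++ [2 * (m : Int), 2 * (m : Int) + 1] := by
      have ha : PySem.List.pyRange 0 (2 * (m : Int) + 1 + 1) 1
          = PySem.List.pyRange 0 (2 * (m : Int) + 1) 1 ++ [2 * (m : Int) + 1] :=
        PySem.List.pyRange_one_succ_right (by positivity)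
      have hb : PySem.List.pyRange 0 (2 * (m : Int) + 1) 1
          = PySem.List.pyRange 0 (2 * (m : Int)) 1 ++ [2 * (m : Int)] :=
        PySem.List.pyRange_one_succ_right (by positivity)
      have : 2 * ((m : Int) + 1) = 2 * (m : Int) + 1 + 1 := by ring
      rw [this, ha, hb]
      simp
    have e2 : PySem.List.pyRange 0 ((m : Int) + 1) 1
        = PySem.List.pyRange 0 (m : Int) 1 ++ [(m : Int)] :=
      PySem.List.pyRange_one_succ_right (by positivity)
    push_cast
    rw [e1, e2, List.foldl_append, List.foldl_append, ih]
    simp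

-- the pairwise fold, with its carried value appended, is B's duplicate-and-prefix list
lemma pv_fold_flat (g : Int → Int) (m : Nat) :
    ((PySem.List.pyRange 0 (m : Int) 1).foldl
        (fun (st : Int × List Int) k =>
          let cur : Int := g k
          (cur, st.2 ++ [st.1, cur])) ((0 : Int), ([] : List Int))).2
      ++ [((PySem.List.pyRange 0 (m : Int) 1).foldl
        (fun (st : Int × List Int) k =>
          let cur : Int := g k
          (cur, st.2 ++ [st.1, cur])) ((0 : Int), ([] : List Int))).1]
    = 0 :: ((PySem.List.pyRange 0 (m : Int) 1).map g).flatMap (fun c => [c, c]) := by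
  induction m with
  | zero => simp [PySem.List.pyRange_one_eq_nil]
  | succ m ih =>
    have e : PySem.List.pyRange 0 ((m : Int) + 1) 1
        = PySem.List.pyRange 0 (m : Int) 1 ++ [(m : Int)] :=
      PySem.List.pyRange_one_succ_right (by positivity)
    push_cast
    rw [e]
    simp only [List.foldl_append, List.map_append, List.flatMap_append, List.foldl_cons,
      List.foldl_nil, List.map_cons, List.map_nil, List.flatMap_cons, List.flatMap_nil]
    have key : ∀ (l : List Int) (a b : Int), l ++ [a, b] = (l ++ [a]) ++ [b] :=
      fun l a b => by simp
    rw [key, ih]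
    simp

lemma pv_flat_len (l : List Int) : (l.flatMap (fun c : Int => [c, c])).length = 2 * l.length := by
  induction l with
  | nil => rfl
  | cons a l ih => simp [ih]; omega

lemma pv_fold_len (g : Int → Int) (m : Nat) :
    ((PySem.List.pyRange 0 (m : Int) 1).foldl
        (fun (st : Int × List Int) k =>
          let cur : Int := g k
          (cur, st.2 ++ [st.1, cur])) ((0 : Int), ([] : List Int))).2.length = 2 * m := by
  have h := congrArg List.length (pv_fold_flat g m)
  simp only [List.length_append, List.length_cons, List.length_nil, pv_flat_len,
    List.length_map, PySem.List.length_pyRange_one] at h ⊢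
  omega

-- ===== VERDICT proof =====
theorem make_output_vector_spec : Claim_equal_make_output_vector := by
  intro bits length inputs _hdom hpre
  unfold Spec_make_output_vector
  obtain ⟨hne, hrest⟩ := hpre
  unfold make_output_vector make_output_vector_alt
  simp only []
  set r0 : List Int := inputs.getD 0 [] with hr0
  set r2 : List Int := inputs.getD 2 [] with hr2
  have hget0 : PySem.List.pyGetD inputs 0 [] = r0 := by
    rw [hr0]; exact PySem.List.pyGetD_zero inputs []
  have hget2 : PySem.List.pyGetD inputs 2 [] = r2 := by
    rw [hr2]
    simpa using PySem.List.pyGetD_natCast inputs 2 []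
  rw [hget0, hget2]
  set h : Nat := r0.length with hh
  set cA : Int → Int := fun i =>
    if PySem.List.pyGetD r2 i 0 ≠ 1 then pvShiftA bits length (PySem.List.pyGetD r0 i 0) else 0
    with hcA
  set cB : Int → Int := fun k =>
    if PySem.List.pyGetD r2 (2 * k + 1) 0 = 1 then 0
    else pvAsrB bits length (PySem.List.pyGetD r0 (2 * k + 1) 0)
    with hcB
  -- the two per-pair value functions agree on the indices the passes touch
  have hagree : ∀ k : Nat, k < h / 2 → cB (k : Int) = cA (2 * (k : Int) + 1) := by
    intro k hk
    by_cases hv : PySem.List.pyGetD r2 (2 * (k : Int) + 1) 0 = 1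
    · rw [hcA, hcB]
      simp [hv]
    · have hcast : PySem.List.pyGetD r2 (2 * (k : Int) + 1) 0 = r2.getD (2 * k + 1) 0 := by
        have e : (2 * (k : Int) + 1) = ((2 * k + 1 : Nat) : Int) := by push_cast; ring
        rw [e, PySem.List.pyGetD_natCast]
      have hv' : r2.getD (2 * k + 1) 0 != 1 := by
        rw [← hcast]
        simpa using hv
      have hh2 : 2 ≤ h := by omega
      obtain ⟨_, _, hbl⟩ := hrest hh2
      have hany : ((List.range (h / 2)).any
          (fun k => r2.getD (2 * k + 1) 0 != 1)) = true := by
        rw [List.any_eq_true]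
        exact ⟨k, List.mem_range.mpr hk, hv'⟩
      obtain ⟨hb, _⟩ := hbl hany
      rw [hcA, hcB]
      simp only []
      rw [if_pos hv, if_neg hv]
      exact (pv_shift_eq bits length _ hb).symm
  have hfd : PySem.Int.floordiv ((h : Nat) : Int) 2 = ((h / 2 : Nat) : Int) := by
    simp [PySem.Int.floordiv, Int.fdiv_eq_ediv]
  rw [hfd]
  -- B's per-pair pass computed with A's value function
  have hmap : (PySem.List.pyRange 0 ((h / 2 : Nat) : Int) 1).map cB
      = (PySem.List.pyRange 0 ((h / 2 : Nat) : Int) 1).map (fun k => cA (2 * k + 1)) := by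
    apply List.map_congr_left
    intro x hx
    rw [PySem.List.mem_pyRange_one] at hx
    obtain ⟨hx0, hx1⟩ := hx
    obtain ⟨k, hkx, hklt⟩ : ∃ k : Nat, (x = (k : Int)) ∧ k < h / 2 :=
      ⟨x.toNat, by omega, by omega⟩
    subst hkx
    exact hagree k hklt
  rw [hmap]
  have htn : ((h : Nat) : Int).toNat = h := by omega
  rw [htn]
  rcases Nat.even_or_odd h with he | ho
  · obtain ⟨m, hm⟩ := he
    have hm2 : h = 2 * m := by omega
    have hmd : h / 2 = m := by omega
    have hrange : ((h : Nat) : Int) = 2 * ((m : Nat) : Int) := by omega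
    rw [hrange, hmd, pv_pair_fold cA m]
    rw [← pv_fold_flat (fun k => cA (2 * k + 1)) m]
    rw [hm2, ← pv_fold_len (fun k => cA (2 * k + 1)) m]
    rw [List.take_left]
  · obtain ⟨m, hm⟩ := ho
    have hmd : h / 2 = m := by omega
    have hrange : ((h : Nat) : Int) = 2 * ((m : Nat) : Int) + 1 := by omega
    rw [hrange, hmd]
    have hsplit : PySem.List.pyRange 0 (2 * ((m : Nat) : Int) + 1) 1
        = PySem.List.pyRange 0 (2 * ((m : Nat) : Int)) 1 ++ [2 * ((m : Nat) : Int)] :=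
      PySem.List.pyRange_one_succ_right (by positivity)
    rw [hsplit, List.foldl_append, pv_pair_fold cA m]
    rw [← pv_fold_flat (fun k => cA (2 * k + 1)) m]
    have hlen : (((PySem.List.pyRange 0 ((m : Nat) : Int) 1).foldl
        (fun (st : Int × List Int) k =>
          let cur : Int := cA (2 * k + 1)
          (cur, st.2 ++ [st.1, cur])) ((0 : Int), ([] : List Int))).2
        ++ [((PySem.List.pyRange 0 ((m : Nat) : Int) 1).foldl
        (fun (st : Int × List Int) k =>
          let cur : Int := cA (2 * k + 1)
          (cur, st.2 ++ [st.1, cur])) ((0 : Int), ([] : List Int))).1]).length = 2 * m + 1 := by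
      simp [pv_fold_len (fun k => cA (2 * k + 1)) m]
    rw [hm, ← hlen, List.take_length]
    simp [PySem.Int.mod]
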